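-- pv_equiv track=rewrite | github.com/TrellixVulnTeam/TIL_6JOV | PycharmProjects/pythonbasic1/python practice/ss4practice.py | printerf
-- ===== SOURCE A (Python) =====
-- def printerf(printer):  # 3 5 4
--     n = 1
--     cnt = 0  #cnt=1
--     while(1):
--         if n % printer[0] == 0:
--             cnt += 1
--         if cnt == printer[2]:
--             break
--         if n % printer[1] == 0:
--             cnt += 1
--         if cnt == printer[2]:
--             break
--         n += 1
--
--     return n
-- ===== SOURCE B (Python) =====
-- def printerf(printer):
--     a = abs(printer[0])
--     b = abs(printer[1])
--     t = printer[2]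
--     lo, hi = 1, t * min(a, b)
--     while lo < hi:
--         mid = (lo + hi) // 2
--         if mid // a + mid // b >= t:
--             hi = mid
--         else:
--             lo = mid + 1
--     return lo
-- ===== Notes on version B (the rewrite author's own statement) =====
-- stated objective: faster
-- what changed: Replaces A's increment-and-count loop over n = 1,2,3,... by a binary search for the smallest n with n//|a| + n//|b| >= target.
-- outside the precondition, e.g. on printerf([1]): A raises IndexError, B raises IndexError
import Mathlib
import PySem

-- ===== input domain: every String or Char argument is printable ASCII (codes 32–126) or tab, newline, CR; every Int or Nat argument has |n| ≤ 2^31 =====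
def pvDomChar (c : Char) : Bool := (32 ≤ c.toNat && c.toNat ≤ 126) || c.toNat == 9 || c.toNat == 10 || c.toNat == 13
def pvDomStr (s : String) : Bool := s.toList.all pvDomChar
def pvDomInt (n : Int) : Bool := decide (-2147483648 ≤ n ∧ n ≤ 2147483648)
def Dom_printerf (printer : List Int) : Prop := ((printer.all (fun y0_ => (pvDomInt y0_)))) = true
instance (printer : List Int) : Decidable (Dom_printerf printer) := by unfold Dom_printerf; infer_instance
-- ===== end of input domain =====

-- B replaces A's one-by-one counting loop (O(answer)) by a binary search for the
-- smallest n with n//|a| + n//|b| >= target (O(log answer)).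

-- ===== PORT A =====
-- A's 'while(1)' loop; the fuel argument only guards totality (it is large enough
-- under Pre_, where the loop provably terminates) and mirrors no Python logic.
def pvLoopA (p0 p1 t : Int) : Nat → Int → Int → Int
  | 0, n, _ => n
  | fuel + 1, n, cnt =>
    let cnt1 := if PySem.Int.mod n p0 = 0 then cnt + 1 else cnt
    if cnt1 = t then n
    else
      let cnt2 := if PySem.Int.mod n p1 = 0 then cnt1 + 1 else cnt1
      if cnt2 = t then n
      else pvLoopA p0 p1 t fuel (n + 1) cnt2

def printerf (printer : List Int) : Int :=
  let p0 := PySem.List.pyGetD printer 0 0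
  let p1 := PySem.List.pyGetD printer 1 0
  let t := PySem.List.pyGetD printer 2 0
  pvLoopA p0 p1 t ((t * min |p0| |p1|).toNat + 1) 1 0

-- ===== PORT B =====
-- B's 'while lo < hi' binary search; fuel is only a totality guard, big enough under Pre_.
def pvBsearch (a b t : Int) : Nat → Int → Int → Int
  | 0, lo, _ => lo
  | fuel + 1, lo, hi =>
    if lo < hi then
      let mid := PySem.Int.floordiv (lo + hi) 2
      if t ≤ PySem.Int.floordiv mid a + PySem.Int.floordiv mid b then
        pvBsearch a b t fuel lo mid
      else
        pvBsearch a b t fuel (mid + 1) hi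
    else lo

def printerf_alt (printer : List Int) : Int :=
  let a := |PySem.List.pyGetD printer 0 0|
  let b := |PySem.List.pyGetD printer 1 0|
  let t := PySem.List.pyGetD printer 2 0
  let hi := t * min a b
  pvBsearch a b t ((hi - 1).toNat + 1) 1 hi

-- ===== PRECONDITION & SPEC =====
-- Pre_ admits exactly the inputs on which A returns: it excludes only inputs where A
-- raises (IndexError for fewer than 3 elements, ZeroDivisionError for a zero divisor
-- it actually reaches) or loops forever (target < 0, or target = 0 with |printer[0]| = 1);
-- the last two disjuncts are the corners where A breaks in its first iteration before
-- ever dividing by printer[1].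
def Pre_printerf (printer : List Int) : Prop :=
  3 ≤ printer.length ∧
    ((printer.getD 0 0 ≠ 0 ∧ printer.getD 1 0 ≠ 0 ∧ 1 ≤ printer.getD 2 0) ∨
     (printer.getD 2 0 = 0 ∧ 2 ≤ |printer.getD 0 0|) ∨
     (|printer.getD 0 0| = 1 ∧ printer.getD 2 0 = 1))
instance (printer : List Int) : Decidable (Pre_printerf printer) := by unfold Pre_printerf; infer_instance

def pvWitness_printerf : List Int := [3, 5, 4]

def Spec_printerf (printer : List Int) (out : Int) : Prop := out = printerf_alt printer
instance (printer : List Int) (out : Int) : Decidable (Spec_printerf printer out) := by unfold Spec_printerf; infer_instance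

-- ===== CLAIM (what is proved, stated in full; the proofs are below) =====
def Claim_equal_printerf : Prop := ∀ (printer : List Int), Dom_printerf printer → Pre_printerf printer → Spec_printerf printer (printerf printer)

-- ===== LEMMAS AND PROOFS =====

-- The count of multiples of a and of b (double-counting common ones) up to n.
def pvCnt (a b n : Int) : Int := n / a + n / b

-- n / d = (n-1) / d + (1 if d ∣ n else 0), for d > 0.
lemma pv_ediv_step (d n : Int) (hd : 0 < d) :
    n / d = (n - 1) / d + (if d ∣ n then 1 else 0) := by
  have h0 := Int.mul_ediv_add_emod n d
  have h1 : 0 ≤ n % d := Int.emod_nonneg n (by omega)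
  have h2 : n % d < d := Int.emod_lt_of_pos n hd
  have hdv : d ∣ n ↔ n % d = 0 := Int.dvd_iff_emod_eq_zero
  by_cases h : d ∣ n
  · simp only [h, if_pos]
    have hr : n % d = 0 := hdv.mp h
    have : (n - 1) / d = n / d - 1 := by
      rw [show n - 1 = (d - 1) + (n / d - 1) * d by linarith,
          Int.add_mul_ediv_right _ _ (by omega : d ≠ 0),
          Int.ediv_eq_zero_of_lt (by omega) (by omega)]
      ring
    omega
  · simp only [h, if_neg, not_false_iff]
    have hr : n % d ≠ 0 := fun hc => h (hdv.mpr hc)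
    have : (n - 1) / d = n / d := by
      rw [show n - 1 = (n % d - 1) + (n / d) * d by linarith,
          Int.add_mul_ediv_right _ _ (by omega : d ≠ 0),
          Int.ediv_eq_zero_of_lt (by omega) (by omega)]
      ring
    omega

lemma pvCnt_step (a b n : Int) (ha : 0 < a) (hb : 0 < b) :
    pvCnt a b n = pvCnt a b (n - 1) + (if a ∣ n then 1 else 0) + (if b ∣ n then 1 else 0) := by
  unfold pvCnt
  rw [pv_ediv_step a n ha, pv_ediv_step b n hb]
  ring

lemma pvCnt_mono (a b m n : Int) (ha : 0 < a) (hb : 0 < b) (h : m ≤ n) :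
    pvCnt a b m ≤ pvCnt a b n := by
  unfold pvCnt
  have := Int.ediv_le_ediv ha h
  have := Int.ediv_le_ediv hb h
  omega

lemma pvCnt_nonpos (a b n : Int) (ha : 0 < a) (hb : 0 < b) (h : n ≤ 0) :
    pvCnt a b n ≤ 0 := by
  have h1 : n / a ≤ 0 / a := Int.ediv_le_ediv ha h
  have h2 : n / b ≤ 0 / b := Int.ediv_le_ediv hb h
  simp at h1 h2
  unfold pvCnt
  omega

lemma pvCnt_hi (a b t : Int) (ha : 0 < a) (hb : 0 < b) (ht : 1 ≤ t) :
    t ≤ pvCnt a b (t * min a b) := by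
  have hm : 0 < min a b := lt_min ha hb
  have hn : 0 ≤ t * min a b := by positivity
  rcases min_choice a b with h | h
  · have h1 : t * min a b / a = t := by rw [h, Int.mul_ediv_cancel _ (by omega)]
    have h2 : 0 ≤ t * min a b / b := Int.ediv_nonneg hn (by omega)
    unfold pvCnt; omega
  · have h1 : t * min a b / b = t := by rw [h, Int.mul_ediv_cancel _ (by omega)]
    have h2 : 0 ≤ t * min a b / a := Int.ediv_nonneg hn (by omega)
    unfold pvCnt; omega

-- A's loop returns the least N with pvCnt ≥ t.
lemma pvLoopA_eq (p0 p1 t N : Int) (ha : p0 ≠ 0) (hb : p1 ≠ 0) (_ht : 1 ≤ t)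
    (hN1 : t ≤ pvCnt |p0| |p1| N) (hN2 : ∀ m, m < N → pvCnt |p0| |p1| m < t) :
    ∀ fuel (n cnt : Int), cnt = pvCnt |p0| |p1| (n - 1) → cnt < t → n ≤ N →
      (N - n).toNat < fuel → pvLoopA p0 p1 t fuel n cnt = N := by
  have hA : (0:Int) < |p0| := by positivity
  have hB : (0:Int) < |p1| := by positivity
  intro fuel
  induction fuel with
  | zero => intro n cnt _ _ _ hf; omega
  | succ fuel ih =>
    intro n cnt hc hlt hn hf
    have hda : (PySem.Int.mod n p0 = 0) ↔ (|p0| ∣ n) := by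
      rw [PySem.Int.mod_eq_zero_iff_dvd, abs_dvd]
    have hdb : (PySem.Int.mod n p1 = 0) ↔ (|p1| ∣ n) := by
      rw [PySem.Int.mod_eq_zero_iff_dvd, abs_dvd]
    have hstep := pvCnt_step |p0| |p1| n hA hB
    simp only [pvLoopA]
    by_cases h1 : (if PySem.Int.mod n p0 = 0 then cnt + 1 else cnt) = t
    · -- first break: pvCnt n ≥ t, so n = N
      rw [if_pos h1]
      have hcn : t ≤ pvCnt |p0| |p1| n := by
        by_cases hd : PySem.Int.mod n p0 = 0
        · have := hda.mp hd
          simp only [hd, if_pos] at h1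
          rw [hstep]; simp only [this, if_pos]
          split_ifs <;> omega
        · simp only [hd, if_neg, not_false_iff] at h1; omega
      by_contra hne
      exact absurd hcn (not_le.mpr (hN2 n (by omega)))
    · rw [if_neg h1]
      by_cases h2 : (if PySem.Int.mod n p1 = 0 then
          (if PySem.Int.mod n p0 = 0 then cnt + 1 else cnt) + 1
          else (if PySem.Int.mod n p0 = 0 then cnt + 1 else cnt)) = t
      · rw [if_pos h2]
        have hcn : t ≤ pvCnt |p0| |p1| n := by
          rw [hstep]
          by_cases hd0 : PySem.Int.mod n p0 = 0 <;> by_cases hd1 : PySem.Int.mod n p1 = 0 <;>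
            simp only [hd0, hd1, if_pos, if_neg, not_false_iff] at h2 ⊢ <;>
            [skip; skip; skip; skip] <;>
            first
              | (rw [if_pos (hda.mp hd0), if_pos (hdb.mp hd1)]; omega)
              | (rw [if_pos (hda.mp hd0)]; rw [if_neg (fun hc => hd1 (hdb.mpr hc))]; omega)
              | (rw [if_neg (fun hc => hd0 (hda.mpr hc)), if_pos (hdb.mp hd1)]; omega)
              | (rw [if_neg (fun hc => hd0 (hda.mpr hc))]; rw [if_neg (fun hc => hd1 (hdb.mpr hc))]; omega)
        by_contra hne
        exact absurd hcn (not_le.mpr (hN2 n (by omega)))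
      · rw [if_neg h2]
        -- no break: cnt2 = pvCnt n < t, continue
        set cnt2 := (if PySem.Int.mod n p1 = 0 then
          (if PySem.Int.mod n p0 = 0 then cnt + 1 else cnt) + 1
          else (if PySem.Int.mod n p0 = 0 then cnt + 1 else cnt)) with hcnt2
        have hcn : cnt2 = pvCnt |p0| |p1| n := by
          rw [hstep, hcnt2]
          by_cases hd0 : PySem.Int.mod n p0 = 0 <;> by_cases hd1 : PySem.Int.mod n p1 = 0 <;>
            simp only [hd0, hd1, if_pos, if_neg, not_false_iff] <;>
            first
              | (rw [if_pos (hda.mp hd0), if_pos (hdb.mp hd1)]; omega)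
              | (rw [if_pos (hda.mp hd0)]; rw [if_neg (fun hc => hd1 (hdb.mpr hc))]; omega)
              | (rw [if_neg (fun hc => hd0 (hda.mpr hc)), if_pos (hdb.mp hd1)]; omega)
              | (rw [if_neg (fun hc => hd0 (hda.mpr hc))]; rw [if_neg (fun hc => hd1 (hdb.mpr hc))]; omega)
        have hlt2 : cnt2 < t := by
          have hb1 : cnt2 ≤ cnt + 2 := by rw [hcnt2]; split_ifs <;> omega
          have hb2 : (if PySem.Int.mod n p0 = 0 then cnt + 1 else cnt) ≤ cnt + 1 := by
            split_ifs <;> omega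
          have hb3 : cnt2 ≤ (if PySem.Int.mod n p0 = 0 then cnt + 1 else cnt) + 1 := by
            rw [hcnt2]; split_ifs <;> omega
          have h1' : (if PySem.Int.mod n p0 = 0 then cnt + 1 else cnt) ≠ t := h1
          have : (if PySem.Int.mod n p0 = 0 then cnt + 1 else cnt) < t := by
            rcases lt_or_ge (if PySem.Int.mod n p0 = 0 then cnt + 1 else cnt) t with h | h
            · exact h
            · split_ifs at h h1' <;> omega
          omega
        have hnN : n < N := by
          rcases lt_or_ge n N with h | h
          · exact h
          · have : n = N := by omega
            rw [this] at hcn; omega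
        exact ih (n + 1) cnt2 (by rw [hcn]; ring_nf) hlt2 (by omega) (by omega)

-- B's binary search returns the least N with pvCnt ≥ t.
lemma pvBsearch_eq (a b t N : Int) (ha : 0 < a) (hb : 0 < b)
    (hN1 : t ≤ pvCnt a b N) (hN2 : ∀ m, m < N → pvCnt a b m < t) :
    ∀ fuel (lo hi : Int), lo ≤ N → N ≤ hi → (hi - lo).toNat < fuel →
      pvBsearch a b t fuel lo hi = N := by
  intro fuel
  induction fuel with
  | zero => intro lo hi _ _ hf; omega
  | succ fuel ih =>
    intro lo hi hlo hhi hf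
    simp only [pvBsearch]
    by_cases hlh : lo < hi
    · rw [if_pos hlh]
      have hmid := PySem.Int.floordiv_two_mid_bounds (lo := lo) (hi := hi) (by omega)
      have hme : PySem.Int.floordiv (lo + hi) 2 = (lo + hi) / 2 :=
        PySem.Int.floordiv_eq_ediv_of_pos (by omega)
      set mid := PySem.Int.floordiv (lo + hi) 2 with hmd
      have hmidlt : mid < hi := by rw [hme]; omega
      have hca : PySem.Int.floordiv mid a = mid / a := PySem.Int.floordiv_eq_ediv_of_pos ha
      have hcb : PySem.Int.floordiv mid b = mid / b := PySem.Int.floordiv_eq_ediv_of_pos hb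
      by_cases hp : t ≤ PySem.Int.floordiv mid a + PySem.Int.floordiv mid b
      · rw [if_pos hp]
        have hcm : t ≤ pvCnt a b mid := by rw [pvCnt, ← hca, ← hcb]; exact hp
        have hNm : N ≤ mid := by
          by_contra hc
          exact absurd hcm (not_le.mpr (hN2 mid (by omega)))
        exact ih lo mid hlo hNm (by omega)
      · rw [if_neg hp]
        have hcm : pvCnt a b mid < t := by
          rw [pvCnt, ← hca, ← hcb]; omega
        have hNm : mid < N := by
          by_contra hc
          have := pvCnt_mono a b N mid ha hb (by omega)
          omega
        exact ih (mid + 1) hi (by omega) hhi (by omega)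
    · rw [if_neg hlh]
      omega

-- ===== VERDICT (by name: the statement is the Claim_ definition above) =====
theorem printerf_spec : Claim_equal_printerf := by
  intro printer _ hpre
  obtain ⟨hlen, hdisj⟩ := hpre
  match printer, hlen with
  | p0 :: p1 :: p2 :: rest, _ =>
    simp only [List.getD, List.getElem?_cons_zero, List.getElem?_cons_succ, Option.getD_some] at hdisj
    unfold Spec_printerf printerf printerf_alt
    have hg0 : PySem.List.pyGetD (p0 :: p1 :: p2 :: rest) 0 0 = p0 := by
      simp [pysem]
    have hg1 : PySem.List.pyGetD (p0 :: p1 :: p2 :: rest) 1 0 = p1 := by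
      simp [pysem]
    have hg2 : PySem.List.pyGetD (p0 :: p1 :: p2 :: rest) 2 0 = p2 := by
      simp [pysem]
    simp only [hg0, hg1, hg2]
    rcases hdisj with ⟨h0, h1, h2⟩ | ⟨ht0, ha2⟩ | ⟨ha1, ht1⟩
    -- degenerate corner: target = 0 and 2 ≤ |printer[0]|, both return 1 at once
    case inr.inl =>
      have hnd : ¬ PySem.Int.mod 1 p0 = 0 := by
        rw [PySem.Int.mod_eq_zero_iff_dvd]
        intro hdvd
        have := Int.le_of_dvd one_pos ((abs_dvd p0 1).mpr hdvd)
        omega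
      rw [ht0]
      simp only [pvLoopA, pvBsearch, hnd, if_false, zero_mul, Int.toNat_zero]
      norm_num
    -- degenerate corner: |printer[0]| = 1 and target = 1, both return 1 at once
    case inr.inr =>
      have hd : PySem.Int.mod 1 p0 = 0 := by
        rw [PySem.Int.mod_eq_zero_iff_dvd, ← abs_dvd, ha1]
      have hm1 : min |p0| |p1| ≤ 1 := min_le_iff.mpr (Or.inl ha1.le)
      rw [ht1]
      have hAside : pvLoopA p0 p1 1 ((1 * min |p0| |p1|).toNat + 1) 1 0 = 1 := by
        simp only [pvLoopA, hd]
        norm_num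
      have hBside : pvBsearch |p0| |p1| 1 ((1 * min |p0| |p1| - 1).toNat + 1) 1
          (1 * min |p0| |p1|) = 1 := by
        simp only [pvBsearch]
        rw [if_neg (by rw [one_mul]; exact not_lt.mpr hm1)]
      rw [hAside, hBside]
    case inl =>
    have hA : (0:Int) < |p0| := by positivity
    have hB : (0:Int) < |p1| := by positivity
    -- the least N with pvCnt ≥ p2, via Nat.find
    have hm0 : (0:Int) ≤ p2 * min |p0| |p1| := by positivity
    have hex : ∃ k : Nat, p2 ≤ pvCnt |p0| |p1| (k : Int) := by
      refine ⟨(p2 * min |p0| |p1|).toNat, ?_⟩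
      rw [Int.toNat_of_nonneg hm0]
      exact pvCnt_hi |p0| |p1| p2 hA hB h2
    set N : Int := (Nat.find hex : Int) with hNdef
    have hN1 : p2 ≤ pvCnt |p0| |p1| N := Nat.find_spec hex
    have hN2 : ∀ x, x < N → pvCnt |p0| |p1| x < p2 := by
      intro x hx
      rcases (by omega : x ≤ 0 ∨ 0 < x) with hx0 | hx0
      · have := pvCnt_nonpos |p0| |p1| x hA hB hx0
        omega
      · have hxe : ((x.toNat : Nat) : Int) = x := Int.toNat_of_nonneg (by omega)
        have hlt : x.toNat < Nat.find hex := by omega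
        have := Nat.find_min hex hlt
        rw [hxe] at this
        omega
    have hNpos : 1 ≤ N := by
      by_contra hc
      have := pvCnt_nonpos |p0| |p1| N hA hB (by omega)
      omega
    have hNm : N ≤ p2 * min |p0| |p1| := by
      by_contra hc
      have := hN2 _ (by omega : p2 * min |p0| |p1| < N)
      have := pvCnt_hi |p0| |p1| p2 hA hB h2
      omega
    rw [pvLoopA_eq p0 p1 p2 N h0 h1 h2 hN1 hN2 _ 1 0 (by simp [pvCnt]) (by omega) hNpos (by omega),
        pvBsearch_eq |p0| |p1| p2 N hA hB hN1 hN2 _ 1 (p2 * min |p0| |p1|) hNpos hNm (by omega)]
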